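-- pv_equiv track=rewrite | github.com/SHUBH-17/Coding-Problems | Solution_2.py | getMinimumTrips
-- ===== SOURCE A (Python) =====
-- def getMinimumTrips(weights):
--     ct = {}
--     for w in weights:
--         ct[w] = ct.get(w, 0) + 1
--
--     ret = 0
--     # the idea is that we want to deliver 3 packages as many times
--     # as possible, because it's greater than 2, so it'll result
--     # in fewer deliveries
--     for w, c in ct.items():
--         if c == 1:
--             # can never deliver 1 package
--             return -1
--         elif c % 3 == 0:
--             # 3 perfectly divides the count, so just deliver
--             # three packages each time
--             ret += c // 3
--         elif c % 3 == 1: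
--             # c == 1 mod 3, so we can deliver 2 packages twice
--             # and then it'll be divisible by 3, so we can deliver
--             # 3 packages for the rest of the count
--             ret += ((c - 4) // 3) + 2
--         else:
--             # c == 2 mod 3, so we can deliver 2 packages once
--             # and then it'll be divisible by 3
--             ret += ((c - 2) // 3) + 1
--
--     return ret
-- ===== SOURCE B (Python) =====
-- def getMinimumTrips(weights):
--     # sort, then scan runs of equal weights; each run's length is that
--     # weight's count, folded with the collapsed formula (c + 2) // 3
--     ws = sorted(weights)
--     total = 0
--     i = 0
--     n = len(ws)
--     while i < n:
--         j = i
--         while j < n and ws[j] == ws[i]: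
--             j += 1
--         c = j - i
--         if c == 1:
--             return -1
--         total += (c + 2) // 3
--         i = j
--     return total
-- ===== Notes on version B (the rewrite author's own statement) =====
-- stated objective: alternative
-- what changed: Replaces the frequency dict and the three mod-3 branches by sorting the list and scanning runs of equal values, folding each run length c with the single collapsed formula (c + 2) // 3.
import Mathlib
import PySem

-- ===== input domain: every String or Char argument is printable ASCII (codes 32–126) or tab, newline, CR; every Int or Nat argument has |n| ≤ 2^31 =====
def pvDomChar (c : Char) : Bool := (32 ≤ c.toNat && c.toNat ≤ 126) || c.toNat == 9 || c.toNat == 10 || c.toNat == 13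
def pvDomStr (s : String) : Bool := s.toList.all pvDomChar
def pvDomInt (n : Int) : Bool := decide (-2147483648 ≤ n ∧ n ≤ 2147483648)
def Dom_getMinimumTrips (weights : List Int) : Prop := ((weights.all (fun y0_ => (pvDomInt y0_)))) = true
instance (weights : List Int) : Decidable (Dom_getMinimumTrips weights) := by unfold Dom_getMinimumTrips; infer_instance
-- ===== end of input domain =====

-- B replaces A's frequency dict and three mod-3 branches by sort + run scan with
-- the collapsed formula (c + 2) // 3; alternative algorithm, same return value.

-- ===== PORT A =====
-- the 'for w, c in ct.items()' loop with its early 'return -1'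
def pvALoop (items : List (Int × Int)) (ret : Int) : Int :=
  match items with
  | [] => ret
  | (_, c) :: rest =>
    if c = 1 then -1
    else if PySem.Int.mod c 3 = 0 then pvALoop rest (ret + PySem.Int.floordiv c 3)
    else if PySem.Int.mod c 3 = 1 then pvALoop rest (ret + (PySem.Int.floordiv (c - 4) 3 + 2))
    else pvALoop rest (ret + (PySem.Int.floordiv (c - 2) 3 + 1))

def getMinimumTrips (weights : List Int) : Int :=
  let ct := weights.foldl (fun d w => d.insert w (d.getD w 0 + 1)) (PySem.Dict.empty : PySem.Dict Int Int)
  pvALoop ct.items 0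

-- ===== PORT B =====
-- the outer while loop of Source B: one step consumes the run of the head value
def pvBLoop (ws : List Int) (total : Int) : Int :=
  match ws with
  | [] => total
  | x :: xs =>
    let c : Int := 1 + (xs.takeWhile (fun y => y == x)).length
    if c = 1 then -1
    else pvBLoop (xs.dropWhile (fun y => y == x)) (total + PySem.Int.floordiv (c + 2) 3)
termination_by ws.length
decreasing_by
  simp only [List.length_cons]
  have := List.length_dropWhile_le (fun y => y == x) xs
  omega

def getMinimumTrips_alt (weights : List Int) : Int :=
  pvBLoop (PySem.List.sorted weights (fun w => w) false) 0

-- ===== PRECONDITION & SPEC =====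
def Spec_getMinimumTrips (weights : List Int) (out : Int) : Prop := out = getMinimumTrips_alt weights
instance (weights : List Int) (out : Int) : Decidable (Spec_getMinimumTrips weights out) := by unfold Spec_getMinimumTrips; infer_instance

-- ===== CLAIM (what is proved, stated in full; the proofs are below) =====
def Claim_equal_getMinimumTrips : Prop := ∀ (weights : List Int), Dom_getMinimumTrips weights → Spec_getMinimumTrips weights (getMinimumTrips weights)

-- ===== LEMMAS AND PROOFS =====

-- common abstraction: fold a list of counts, early -1 on a count of 1
def pvAgg (cs : List Int) (t : Int) : Int :=
  match cs with
  | [] => t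
  | c :: rest => if c = 1 then -1 else pvAgg rest (t + PySem.Int.floordiv (c + 2) 3)

theorem pvAgg_closed (cs : List Int) (t : Int) :
    pvAgg cs t = if (1 : Int) ∈ cs then -1
      else t + (cs.map (fun c => PySem.Int.floordiv (c + 2) 3)).sum := by
  induction cs generalizing t with
  | nil => simp [pvAgg]
  | cons c rest ih =>
    simp only [pvAgg, List.mem_cons, List.map_cons, List.sum_cons]
    by_cases h1 : c = 1
    · simp [h1]
    · have hne : ¬ ((1 : Int) = c) := fun e => h1 e.symm
      rw [if_neg h1, ih]
      by_cases h2 : (1 : Int) ∈ rest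
      · simp [h2]
      · simp only [h2, hne, if_false, or_self]
        ring

theorem pvAgg_perm {cs cs' : List Int} (h : cs.Perm cs') (t : Int) :
    pvAgg cs t = pvAgg cs' t := by
  rw [pvAgg_closed, pvAgg_closed, (h.map _).sum_eq]
  simp [h.mem_iff]

theorem pvALoop_eq_agg (items : List (Int × Int)) (h : ∀ p ∈ items, 1 ≤ p.2) (t : Int) :
    pvALoop items t = pvAgg (items.map Prod.snd) t := by
  induction items generalizing t with
  | nil => rfl
  | cons p rest ih =>
    obtain ⟨k, c⟩ := p
    have hc : 1 ≤ c := h (k, c) (List.mem_cons_self)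
    have h' : ∀ q ∈ rest, 1 ≤ q.2 := fun q hq => h q (List.mem_cons_of_mem _ hq)
    simp only [pvALoop, pvAgg, List.map_cons]
    by_cases h1 : c = 1
    · simp [h1]
    · have hm : PySem.Int.mod c 3 = c % 3 := PySem.Int.mod_eq_emod_of_pos (by norm_num)
      have hd : ∀ a : Int, PySem.Int.floordiv a 3 = a / 3 :=
        fun a => PySem.Int.floordiv_eq_ediv_of_pos (by norm_num)
      rw [if_neg h1, if_neg h1, hm, hd, hd, hd, hd]
      split_ifs with e0 e1 <;> rw [ih h'] <;> congr 1 <;> omega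

-- the run lengths pvBLoop consumes, as a list of counts
def pvRuns (ws : List Int) : List Int :=
  match ws with
  | [] => []
  | x :: xs =>
    ((1 : Int) + (xs.takeWhile (fun y => y == x)).length) ::
      pvRuns (xs.dropWhile (fun y => y == x))
termination_by ws.length
decreasing_by
  simp only [List.length_cons]
  have := List.length_dropWhile_le (fun y => y == x) xs
  omega

theorem pvBLoop_eq_agg (ws : List Int) (t : Int) :
    pvBLoop ws t = pvAgg (pvRuns ws) t := by
  induction ws using pvRuns.induct generalizing t with
  | case1 => simp [pvBLoop, pvRuns, pvAgg]
  | case2 x xs ih =>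
    simp only [pvBLoop, pvRuns, pvAgg]
    split_ifs with h1
    · rfl
    · exact ih _

-- runs of a sorted list are a permutation of (count k) over any nodup
-- enumeration D of its distinct values
theorem pvRuns_perm (ws : List Int) (hs : ws.Pairwise (· ≤ ·)) (D : List Int)
    (hD : D.Nodup) (hmem : ∀ k, k ∈ D ↔ k ∈ ws) :
    (pvRuns ws).Perm (D.map (fun k => (ws.count k : Int))) := by
  induction ws using pvRuns.induct generalizing D with
  | case1 =>
    have : D = [] := by
      cases D with
      | nil => rfl
      | cons a _ => exact absurd ((hmem a).mp (List.mem_cons_self)) (List.not_mem_nil)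
    simp [pvRuns, this]
  | case2 x xs ih =>
    have hall : ∀ y ∈ xs, x ≤ y := (List.pairwise_cons.mp hs).1
    have hxs : xs.Pairwise (· ≤ ·) := (List.pairwise_cons.mp hs).2
    set tk := xs.takeWhile (fun y => y == x) with htk
    set dr := xs.dropWhile (fun y => y == x) with hdr
    have hsplit : tk ++ dr = xs := List.takeWhile_append_dropWhile
    have htkx : ∀ y ∈ tk, y = x := by
      intro y hy
      have := List.mem_takeWhile_imp hy
      simpa using this
    have hdr_gt : ∀ y ∈ dr, x < y := by
      intro y hy
      cases hcase : dr with
      | nil => rw [hcase] at hy; exact absurd hy List.not_mem_nil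
      | cons z zs =>
        have hz : ¬ (z == x) = true := by
          have := List.head?_dropWhile_not (fun y => y == x) xs
          rw [← hdr, hcase] at this
          simpa using this
        have hzx : z ≠ x := by simpa using hz
        have hzmem : z ∈ xs := by
          have : z ∈ dr := by rw [hcase]; exact List.mem_cons_self
          exact (List.dropWhile_sublist _).mem this
        have hxz : x < z := lt_of_le_of_ne (hall z hzmem) (Ne.symm hzx)
        have hpdr : dr.Pairwise (· ≤ ·) := hxs.sublist (List.dropWhile_sublist _)
        rw [hcase] at hpdr hy
        rcases List.mem_cons.mp hy with rfl | hy'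
        · exact hxz
        · exact lt_of_lt_of_le hxz ((List.pairwise_cons.mp hpdr).1 y hy')
    have hxdr : x ∉ dr := fun hx => lt_irrefl x (hdr_gt x hx)
    have hdrsorted : dr.Pairwise (· ≤ ·) := hxs.sublist (List.dropWhile_sublist _)
    have htc : tk.count x = tk.length := List.count_eq_length.mpr (by
      intro b hb; exact (htkx b hb).symm ▸ rfl)
    have hdc : dr.count x = 0 := List.count_eq_zero.mpr hxdr
    have hxcount : ((x :: xs).count x : Int) = 1 + tk.length := by
      rw [List.count_cons_self, ← hsplit, List.count_append, htc, hdc]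
      push_cast; ring
    have hkcount : ∀ k, k ≠ x → (x :: xs).count k = dr.count k := by
      intro k hk
      have h0 : tk.count k = 0 := List.count_eq_zero.mpr (fun hkm => hk (htkx k hkm))
      rw [← hsplit]
      simp [List.count_append, h0, Ne.symm hk]
    have hxD : x ∈ D := (hmem x).mpr (List.mem_cons_self)
    have hpermD : D.Perm (x :: D.erase x) := List.perm_cons_erase hxD
    have hED : (D.erase x).Nodup := hD.erase x
    have hEmem : ∀ k, k ∈ D.erase x ↔ k ∈ dr := by
      intro k
      constructor
      · intro hk
        have hkD := (List.Nodup.mem_erase_iff hD).mp hk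
        have hkxs : k ∈ xs := by
          rcases List.mem_cons.mp ((hmem k).mp hkD.2) with rfl | h
          · exact absurd rfl hkD.1
          · exact h
        rw [← hsplit] at hkxs
        rcases List.mem_append.mp hkxs with h | h
        · exact absurd (htkx k h) hkD.1
        · exact h
      · intro hk
        have hkx : k ≠ x := fun e => hxdr (e ▸ hk)
        refine (List.Nodup.mem_erase_iff hD).mpr ⟨hkx, (hmem k).mpr ?_⟩
        exact List.mem_cons_of_mem _ ((List.dropWhile_sublist _).mem hk)
    have ihdr := ih hdrsorted (D.erase x) hED hEmem
    have ihdr2 : (pvRuns dr).Perm ((D.erase x).map (fun k => ((x :: xs).count k : Int))) := by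
      have : (D.erase x).map (fun k => ((x :: xs).count k : Int))
          = (D.erase x).map (fun k => (dr.count k : Int)) := by
        refine List.map_congr_left ?_
        intro k hk
        rw [hkcount k ((List.Nodup.mem_erase_iff hD).mp hk).1]
      rw [this]
      exact ihdr
    have e1 : pvRuns (x :: xs) = ((1 : Int) + tk.length) :: pvRuns dr := by
      rw [pvRuns, ← htk, ← hdr]
    rw [e1]
    have step1 : (((1 : Int) + (tk.length : Int)) :: pvRuns dr).Perm
        ((x :: D.erase x).map (fun k => ((x :: xs).count k : Int))) := by
      simp only [List.map_cons]
      rw [← hxcount]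
      exact ihdr2.cons _
    exact step1.trans ((hpermD.map _).symm)

-- ===== VERDICT (by name: the statement is the Claim_ definition above) =====
theorem getMinimumTrips_spec : Claim_equal_getMinimumTrips := by
  intro weights _
  unfold Spec_getMinimumTrips getMinimumTrips_alt
  show pvALoop (PySem.Dict.counter weights).items 0
      = pvBLoop (PySem.List.sorted weights (fun w => w) false) 0
  rw [PySem.Dict.items_counter]
  set S := PySem.List.sorted weights (fun w => w) false with hS
  have hperm : S.Perm weights := PySem.List.sorted_perm weights (fun w => w) false
  have hsorted : S.Pairwise (· ≤ ·) := by
    have := PySem.List.sorted_pairwise (xs := weights) (key := fun w => w)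
    simpa using this
  rw [pvBLoop_eq_agg, pvALoop_eq_agg]
  · have hruns := pvRuns_perm S hsorted (PySem.Set.ofList weights)
      (PySem.Set.nodup_ofList weights) (fun k => by
        rw [PySem.Set.mem_ofList, hperm.mem_iff])
    have hmapeq : (PySem.Set.ofList weights).map (fun k => (S.count k : Int))
        = (PySem.Set.ofList weights).map (fun k => (weights.count k : Int)) := by
      refine List.map_congr_left ?_
      intro k _
      rw [hperm.count_eq]
    rw [hmapeq] at hruns
    have heq : ((PySem.Set.ofList weights).map (fun k => (k, (weights.count k : Int)))).map Prod.snd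
        = (PySem.Set.ofList weights).map (fun k => (weights.count k : Int)) := by
      rw [List.map_map]; rfl
    rw [heq]
    exact (pvAgg_perm hruns 0).symm
  · intro p hp
    rcases List.mem_map.mp hp with ⟨k, hk, rfl⟩
    have hkw : k ∈ weights := by rw [PySem.Set.mem_ofList] at hk; exact hk
    have := List.count_pos_iff.mpr hkw
    simpa using this
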